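-- pv_equiv track=rewrite | github.com/jramaswami/Binary_Search_Python | longest_consecutive_duplicate_string.py | solve
-- ===== SOURCE A (Python) =====
-- def solve(s):
--     longest = 0
--     curr_char = ''
--     curr_streak = 0
--     for c in s:
--         if curr_char == c:
--             curr_streak += 1
--             longest = max(curr_streak, longest)
--         else:
--             curr_streak = 1
--             curr_char = c
--     return longest
-- ===== SOURCE B (Python) =====
-- def solve(s):
--     # Build the list of maximal runs (char, length) in one grouping pass,
--     # then take the max run length >= 2 in a separate reduce pass.
--     runs = []
--     for c in s:
--         if runs and runs[-1][0] == c: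
--             runs[-1][1] += 1
--         else:
--             runs.append([c, 1])
--     return max((k for _, k in runs if k >= 2), default=0)
-- ===== Notes on version B (the rewrite author's own statement) =====
-- stated objective: alternative
-- what changed: B first groups the string into maximal runs of equal characters and then, in a separate reduce pass, takes the maximum run length that is at least 2 (default 0), instead of A's single incremental scan that updates the maximum while streaking.
import Mathlib
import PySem

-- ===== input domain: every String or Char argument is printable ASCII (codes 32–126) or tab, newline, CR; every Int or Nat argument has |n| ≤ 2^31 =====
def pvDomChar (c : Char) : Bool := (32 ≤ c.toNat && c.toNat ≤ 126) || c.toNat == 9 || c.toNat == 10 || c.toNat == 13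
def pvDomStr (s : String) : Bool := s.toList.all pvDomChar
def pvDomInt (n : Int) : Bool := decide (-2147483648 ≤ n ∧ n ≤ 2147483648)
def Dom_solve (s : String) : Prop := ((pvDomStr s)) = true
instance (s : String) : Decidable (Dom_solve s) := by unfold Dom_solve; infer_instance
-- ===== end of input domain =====

-- B groups the string into maximal runs first, then reduces; A does one incremental scan. Same values, different decomposition.

-- ===== PORT A =====
-- state: (longest, curr_char, curr_streak); Python's initial curr_char = '' (matches no char) is ported as `none`
def solveStep (st : Int × Option Char × Int) (c : Char) : Int × Option Char × Int :=
  match st with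
  | (longest, currChar, currStreak) =>
    if currChar = some c then (max (currStreak + 1) longest, currChar, currStreak + 1)
    else (longest, some c, 1)

def solve (s : String) : Int :=
  (s.toList.foldl solveStep (0, none, 0)).1

-- ===== PORT B =====
-- grouping pass: the accumulator holds the runs in REVERSED order (head = last run),
-- the standard port of Python's append-at-end / runs[-1] update; the reduce pass is order-insensitive
def groupStep (acc : List (Char × Int)) (c : Char) : List (Char × Int) :=
  match acc with
  | (d, k) :: rest => if d = c then (d, k + 1) :: rest else (c, 1) :: (d, k) :: rest
  | [] => [(c, 1)]

-- port of max((k for _, k in runs if k >= 2), default=0)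
def solve_alt (s : String) : Int :=
  ((s.toList.foldl groupStep []).filterMap
      (fun p => if (2 : Int) ≤ p.2 then some p.2 else none)).foldl max 0

-- ===== PRECONDITION & SPEC =====
def Spec_solve (s : String) (out : Int) : Prop := out = solve_alt s
instance (s : String) (out : Int) : Decidable (Spec_solve s out) := by unfold Spec_solve; infer_instance

-- ===== CLAIM (what is proved, stated in full; the proofs are below) =====
def Claim_equal_solve : Prop := ∀ (s : String), Dom_solve s → Spec_solve s (solve s)

-- ===== LEMMAS AND PROOFS =====

-- value of B's reduce pass on a run list
def runMax (acc : List (Char × Int)) : Int :=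
  (acc.filterMap (fun p => if (2 : Int) ≤ p.2 then some p.2 else none)).foldl max 0

theorem foldl_max_max (l : List Int) : ∀ (a b : Int),
    l.foldl max (max a b) = max a (l.foldl max b) := by
  induction l with
  | nil => intro a b; rfl
  | cons c t ih =>
    intro a b
    simp only [List.foldl_cons, max_assoc]
    exact ih a (max b c)

theorem runMax_cons_ge (d : Char) (k : Int) (rest : List (Char × Int)) (hk : (2 : Int) ≤ k) :
    runMax ((d, k) :: rest) = max k (runMax rest) := by
  simp only [runMax, List.filterMap_cons, if_pos hk, List.foldl_cons]
  rw [max_comm (0 : Int) k]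
  exact foldl_max_max _ k 0

theorem runMax_cons_lt (d : Char) (k : Int) (rest : List (Char × Int)) (hk : ¬ (2 : Int) ≤ k) :
    runMax ((d, k) :: rest) = runMax rest := by
  simp only [runMax, List.filterMap_cons, if_neg hk]

theorem runMax_bump (d : Char) (m : Int) (rest : List (Char × Int)) (hm : 1 ≤ m) :
    runMax ((d, m + 1) :: rest) = max (m + 1) (runMax ((d, m) :: rest)) := by
  by_cases h2 : (2:Int) ≤ m
  · rw [runMax_cons_ge d (m + 1) rest (by omega), runMax_cons_ge d m rest h2]
    rw [← max_assoc]
    congr 1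
    omega
  · have hm1 : m = 1 := by omega
    subst hm1
    rw [show (1:Int) + 1 = 2 from rfl, runMax_cons_ge d 2 rest (by omega),
      runMax_cons_lt d 1 rest (by omega)]

-- loop invariant: A's scan state mirrors B's (reversed) run list
theorem loop_inv : ∀ (cs : List Char) (acc : List (Char × Int)) (l : Int) (cc : Option Char) (k : Int),
    ((acc = [] ∧ l = 0 ∧ cc = none ∧ k = 0) ∨
     (∃ d m rest, acc = (d, m) :: rest ∧ cc = some d ∧ k = m ∧ 1 ≤ m ∧ l = runMax acc)) →
    (cs.foldl solveStep (l, cc, k)).1 = runMax (cs.foldl groupStep acc) := by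
  intro cs
  induction cs with
  | nil =>
    intro acc l cc k h
    rcases h with ⟨hacc, hl, _, _⟩ | ⟨d, m, rest, hacc, _, _, _, hl⟩ <;> subst hacc <;> subst hl <;> rfl
  | cons c t ih =>
    intro acc l cc k h
    rcases h with ⟨hacc, hl, hcc, hk⟩ | ⟨d, m, rest, hacc, hcc, hk, hm, hl⟩
    · subst hacc; subst hl; subst hcc; subst hk
      simp only [List.foldl_cons, solveStep, groupStep, reduceCtorEq]
      exact ih [(c, 1)] 0 (some c) 1 (Or.inr ⟨c, 1, [], rfl, rfl, rfl, le_refl 1, by rfl⟩)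
    · subst hacc; subst hcc; subst hl; subst hk
      by_cases hdc : d = c
      · subst hdc
        simp only [List.foldl_cons, solveStep, groupStep]
        have h := ih ((d, k + 1) :: rest) (runMax ((d, k + 1) :: rest)) (some d) (k + 1)
          (Or.inr ⟨d, k + 1, rest, rfl, rfl, rfl, by omega, rfl⟩)
        rw [runMax_bump d k rest hm] at h
        exact h
      · simp only [List.foldl_cons, solveStep, groupStep,
          if_neg (fun h => hdc (Option.some.inj h)), if_neg hdc]
        exact ih ((c, 1) :: (d, k) :: rest) (runMax ((d, k) :: rest)) (some c) 1
          (Or.inr ⟨c, 1, (d, k) :: rest, rfl, rfl, rfl, le_refl 1,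
            (runMax_cons_lt c 1 ((d, k) :: rest) (by omega)).symm⟩)

-- ===== VERDICT (by name: the statement is the Claim_ definition above) =====
theorem solve_spec : Claim_equal_solve := by
  intro s _
  show solve s = solve_alt s
  exact loop_inv s.toList [] 0 none 0 (Or.inl ⟨rfl, rfl, rfl, rfl⟩)
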